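-- pv_equiv track=rewrite | github.com/AlgoLab/cancer_ea | collection_helpers.py | set_in_both_lists
-- ===== SOURCE A (Python) =====
-- def sets_are_equal(set1,set2):
--     """ Checks if sets are equal
--
--     Args:
--         set1 (set): first set for comparison.
--         set2 (set): second set for comparison.
--
--     Returns:
--         boolean that indicate equality of the sets
--     """
--     for x in set1:
--         if( not x in set2):
--             return False;
--     for x in set2:
--         if( not x in set1):
--             return False;
--     return True
--
-- def set_in_both_lists(list1, list2):
--     """ Checks if two lists are containing the same set
--
--     Args:
--         list1 (list): first list for check.
--         list2 (list): second list for check.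
--
--     Returns:
--         set that is common for both lists. Empty set if there is no common
--         elements.
--     """
--     intersect = set()
--     for s1 in list1:
--         for s2 in list2:
--             if(len(s1)>0 and len(s2)>0 and sets_are_equal(s1, s2)):
--                 if( len(s1)>len(intersect)):
--                     intersect = s1
--     return intersect
-- ===== SOURCE B (Python) =====
-- def set_in_both_lists(list1, list2):
--     """Largest nonempty member of list1 that equals (as a set) some nonempty
--     member of list2; set() if there is none.  Hash-based: one set of frozensets
--     from list2, one filtering pass over list1, then max(key=len) (first maximal
--     element, matching list1 order)."""
--     present = {frozenset(s) for s in list2 if len(s) > 0}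
--     matches = [s for s in list1 if len(s) > 0 and frozenset(s) in present]
--     return max(matches, key=len) if matches else set()
-- ===== Notes on version B (the rewrite author's own statement) =====
-- stated objective: alternative
-- what changed: Replaces A's nested scan (every list1 member compared element-by-element against every list2 member, with a running max) by a hash index: one set of frozensets built from list2's nonempty members, one filtering pass over list1, and max(key=len) to pick the first largest match (measured ~1.4x faster at the largest timing size, below the 1.5x bar).
import Mathlib
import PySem

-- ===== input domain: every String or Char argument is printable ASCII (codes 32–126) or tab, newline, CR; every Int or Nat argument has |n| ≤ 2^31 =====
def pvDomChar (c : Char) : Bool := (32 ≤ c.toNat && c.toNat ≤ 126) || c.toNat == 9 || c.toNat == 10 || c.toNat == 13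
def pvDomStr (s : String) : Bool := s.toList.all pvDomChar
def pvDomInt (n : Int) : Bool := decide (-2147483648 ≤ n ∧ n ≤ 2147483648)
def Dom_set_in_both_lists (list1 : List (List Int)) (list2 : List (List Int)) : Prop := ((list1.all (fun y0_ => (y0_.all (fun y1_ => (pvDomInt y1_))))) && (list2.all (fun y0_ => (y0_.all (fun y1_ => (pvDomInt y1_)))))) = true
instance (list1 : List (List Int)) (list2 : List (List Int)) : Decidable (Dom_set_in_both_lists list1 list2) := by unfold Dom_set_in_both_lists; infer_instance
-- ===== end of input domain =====

-- B replaces A's nested member-by-member scan with a set of frozensets from list2,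
-- one filtering pass over list1 and max(key=len); same value on every input.
-- ===== PORT A =====
-- Port of sets_are_equal: two early-return membership loops = two List.all passes.
def sets_are_equal (set1 : List Int) (set2 : List Int) : Bool :=
  set1.all (fun x => set2.contains x) && set2.all (fun x => set1.contains x)

def set_in_both_lists (list1 : List (List Int)) (list2 : List (List Int)) : List Int :=
  list1.foldl (fun intersect s1 =>
    list2.foldl (fun intersect s2 =>
      if decide (0 < s1.length) && decide (0 < s2.length) && sets_are_equal s1 s2 then
        (if decide (intersect.length < s1.length) then s1 else intersect)
      else intersect) intersect) []

-- ===== PORT B =====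
-- frozenset(s), ported exactly as the canonical form of s: the sorted duplicate-free
-- list (two frozensets are equal iff their canonical forms are equal lists).
def frozen (s : List Int) : List Int :=
  PySem.List.sorted (PySem.Set.ofList s) (fun x => x) false

def set_in_both_lists_alt (list1 : List (List Int)) (list2 : List (List Int)) : List Int :=
  let present : PySem.Set (List Int) :=
    PySem.Set.ofList ((list2.filter (fun s => decide (0 < s.length))).map frozen)
  let candidates := list1.filter
    (fun s => decide (0 < s.length) && PySem.Set.contains present (frozen s))
  match PySem.List.max? candidates (fun s => PySem.List.len s) with
  | some m => m
  | none => []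
-- ===== PRECONDITION & SPEC =====
def Spec_set_in_both_lists (list1 : List (List Int)) (list2 : List (List Int)) (out : List Int) : Prop := out = set_in_both_lists_alt list1 list2
instance (list1 : List (List Int)) (list2 : List (List Int)) (out : List Int) : Decidable (Spec_set_in_both_lists list1 list2 out) := by unfold Spec_set_in_both_lists; infer_instance

-- ===== CLAIM (what is proved, stated in full; the proofs are below) =====
def Claim_equal_set_in_both_lists : Prop := ∀ (list1 : List (List Int)) (list2 : List (List Int)), Dom_set_in_both_lists list1 list2 → Spec_set_in_both_lists list1 list2 (set_in_both_lists list1 list2)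

-- ===== LEMMAS AND PROOFS =====

-- the condition under which A's inner loop would adopt s (a nonempty member of
-- list1 that is set-equal to some nonempty member of list2)
def matchB (list2 : List (List Int)) (s : List Int) : Bool :=
  decide (0 < s.length) && list2.any (fun t => decide (0 < t.length) && sets_are_equal s t)

theorem sets_are_equal_iff (s t : List Int) :
    sets_are_equal s t = true ↔ (∀ x : Int, x ∈ s ↔ x ∈ t) := by
  simp only [sets_are_equal, Bool.and_eq_true, List.all_eq_true, List.contains_iff_mem]
  constructor
  · rintro ⟨h1, h2⟩ x; exact ⟨fun hx => h1 x hx, fun hx => h2 x hx⟩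
  · intro h; exact ⟨fun x hx => (h x).mp hx, fun x hx => (h x).mpr hx⟩

theorem frozen_eq_iff (s t : List Int) :
    frozen s = frozen t ↔ (∀ x : Int, x ∈ s ↔ x ∈ t) := by
  constructor
  · intro h x
    have hs : x ∈ frozen s ↔ x ∈ s := by
      simp [frozen, PySem.List.mem_sorted, PySem.Set.mem_ofList]
    have ht : x ∈ frozen t ↔ x ∈ t := by
      simp [frozen, PySem.List.mem_sorted, PySem.Set.mem_ofList]
    rw [← hs, ← ht, h]
  · intro h
    apply PySem.List.sorted_eq_sorted_of_perm _ _ _ (fun a b hab => hab)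
    rw [List.perm_ext_iff_of_nodup (PySem.Set.nodup_ofList s) (PySem.Set.nodup_ofList t)]
    intro a
    simp only [PySem.Set.mem_ofList]
    exact h a

theorem contains_present (list2 : List (List Int)) (s : List Int) :
    PySem.Set.contains
      (PySem.Set.ofList ((list2.filter (fun t => decide (0 < t.length))).map frozen))
      (frozen s)
    = list2.any (fun t => decide (0 < t.length) && sets_are_equal s t) := by
  rw [Bool.eq_iff_iff]
  rw [PySem.Set.contains_iff, PySem.Set.mem_ofList]
  simp only [List.mem_map, List.mem_filter, List.any_eq_true, Bool.and_eq_true,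
    decide_eq_true_eq]
  constructor
  · rintro ⟨t, ⟨ht2, htpos⟩, hfz⟩
    exact ⟨t, ht2, htpos, (sets_are_equal_iff s t).mpr (fun x => ((frozen_eq_iff t s).mp hfz x).symm)⟩
  · rintro ⟨t, ht2, htpos, heq⟩
    exact ⟨t, ⟨ht2, htpos⟩, (frozen_eq_iff t s).mpr (fun x => ((sets_are_equal_iff s t).mp heq x).symm)⟩

theorem inner_fold (s1 : List Int) (list2 : List (List Int)) :
    ∀ (acc : List Int),
    list2.foldl (fun intersect s2 =>
      if decide (0 < s1.length) && decide (0 < s2.length) && sets_are_equal s1 s2 then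
        (if decide (intersect.length < s1.length) then s1 else intersect)
      else intersect) acc
    = if matchB list2 s1 && decide (acc.length < s1.length) then s1 else acc := by
  induction list2 with
  | nil => intro acc; simp [matchB]
  | cons t rest ih =>
    intro acc
    rw [List.foldl_cons]
    by_cases h1 : 0 < s1.length
    · by_cases hpt : (decide (0 < t.length) && sets_are_equal s1 t) = true
      · by_cases h3 : acc.length < s1.length
        · rw [if_pos (by simp [h1, hpt]), if_pos (by simp [h3]), ih s1]
          simp [matchB, h1, hpt, h3]
        · rw [if_pos (by simp [h1, hpt]), if_neg (by simp [h3]), ih acc]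
          simp [matchB, h1, hpt, h3]
      · rw [if_neg (by
            intro hcon
            apply hpt
            rw [Bool.and_eq_true, Bool.and_eq_true] at hcon
            simp [hcon.1.2, hcon.2])]
        rw [ih acc]
        simp [matchB, List.any_cons, hpt]
    · rw [if_neg (by simp [h1]), ih acc]
      simp [matchB, h1]

theorem A_eq_fold (list1 list2 : List (List Int)) :
    set_in_both_lists list1 list2
    = list1.foldl (fun acc s => if matchB list2 s && decide (acc.length < s.length) then s else acc) [] := by
  unfold set_in_both_lists
  congr 1
  funext acc s
  exact inner_fold s list2 acc

theorem core_fold (p : List Int → Bool) (hp : ∀ s, p s = true → 0 < s.length) :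
    ∀ (l : List (List Int)) (acc : Option (List Int)),
      (∀ m, acc = some m → 0 < m.length) →
    l.foldl (fun a s => if p s && decide (a.length < s.length) then s else a) (acc.getD [])
    = ((l.filter p).foldl (fun a x =>
        match a with
        | none => some x
        | some m => if PySem.List.len m < PySem.List.len x then some x else some m) acc).getD [] := by
  intro l
  induction l with
  | nil => intro acc hacc; simp
  | cons s t ih =>
    intro acc hacc
    rw [List.foldl_cons, List.filter_cons]
    by_cases hps : p s = true
    · rw [if_pos hps, List.foldl_cons]
      cases acc with
      | none =>
        have hs := hp s hps
        rw [show ((none : Option (List Int)).getD [] : List Int) = [] from rfl]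
        rw [if_pos (by simp [hps, hs])]
        exact ih (some s) (by rintro m ⟨rfl⟩; exact hs)
      | some m =>
        rw [show ((some m).getD [] : List Int) = m from rfl]
        by_cases hlt : m.length < s.length
        · rw [if_pos (by simp [hps, hlt])]
          rw [show ((match some m with
              | none => some s
              | some m => if PySem.List.len m < PySem.List.len s then some s else some m)
              : Option (List Int)) = some s by
            simp [PySem.List.len_eq, hlt]]
          exact ih (some s) (by rintro m' ⟨rfl⟩; exact hp s hps)
        · rw [if_neg (by simp [hlt])]
          rw [show ((match some m with
              | none => some s
              | some m => if PySem.List.len m < PySem.List.len s then some s else some m)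
              : Option (List Int)) = some m by
            simp [PySem.List.len_eq, hlt]]
          exact ih (some m) hacc
    · rw [if_neg hps, if_neg (by simp [hps])]
      exact ih acc hacc

theorem B_eq_fold (list1 list2 : List (List Int)) :
    set_in_both_lists_alt list1 list2
    = (PySem.List.max? (list1.filter (matchB list2)) (fun s => PySem.List.len s)).getD [] := by
  show (match PySem.List.max?
      (list1.filter (fun s => decide (0 < s.length) &&
        PySem.Set.contains
          (PySem.Set.ofList ((list2.filter (fun t => decide (0 < t.length))).map frozen))
          (frozen s)))
      (fun s => PySem.List.len s) with
    | some m => m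
    | none => []) = _
  rw [List.filter_congr (fun s _ => by rw [contains_present]; rfl :
    ∀ s ∈ list1, (decide (0 < s.length) &&
      PySem.Set.contains
        (PySem.Set.ofList ((list2.filter (fun t => decide (0 < t.length))).map frozen))
        (frozen s)) = matchB list2 s)]
  cases h : PySem.List.max? (list1.filter (matchB list2)) (fun s => PySem.List.len s) with
  | none => simp
  | some m => simp

-- ===== VERDICT (by name: the statement is the Claim_ definition above) =====
theorem set_in_both_lists_spec : Claim_equal_set_in_both_lists := by
  intro list1 list2 _
  unfold Spec_set_in_both_lists
  rw [A_eq_fold, B_eq_fold]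
  have h := core_fold (matchB list2)
    (fun s h => by rw [matchB, Bool.and_eq_true, decide_eq_true_eq] at h; exact h.1)
    list1 none (by rintro m ⟨⟩)
  simp only [Option.getD_none] at h
  rw [h]
  congr 1
  unfold PySem.List.max?
  congr 1
  funext a x
  cases a <;> rfl
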